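-- pv_equiv track=rewrite | github.com/idvairaz/School_21_educational_project_for_IT_specialists_from_SBER | Data_Science/DS_Bootcamp.Day01.ID_886511-1/src/ex01/read_and_write.py | convert_line_to_tsv
-- ===== SOURCE A (Python) =====
-- def is_delimiter_comma(line: str, pos: int) -> bool:
--     """Определяет, является ли запятая разделителем столбцов (а не частью данных).
--
--     Args:
--         line (str): Строка CSV для анализа.
--         pos (int): Позиция запятой в строке.
--
--     Returns:
--         bool: True, если запятая является разделителем столбцов (вне кавычек).
--
--     """
--     in_quotes = False
--     for i, char in enumerate(line[:pos]):
--         if char == '"':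
--             in_quotes = not in_quotes
--     return not in_quotes
--
-- def convert_line_to_tsv(line: str) -> str:
--     """Конвертирует строку CSV в TSV, заменяя только разделяющие запятые на табы.
--
--     Обрабатывает строку CSV, сохраняя запятые внутри кавычек (данных) неизменными.
--     Например: '"ООО ""Рога"", 2024",100,000' -> '"ООО ""Рога"", 2024"\t100\t000'.
--
--     Args:
--         line (str): Строка в формате CSV (с кавычками и запятыми-разделителями).
--
--     Returns:
--         str: Строка в формате TSV, где разделители заменены на табы (\t).
--
--     Raises:
--         ValueError: Если строка содержит несбалансированные кавычки.
--
--     """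
--     if line.count('"') % 2 != 0:
--         raise ValueError("Несбалансированные кавычки в строке")
--     result = []
--     i = 0
--     while i < len(line):
--         if line[i] == ',' and is_delimiter_comma(line, i):
--             result.append('\t')
--             i += 1
--         else:
--             result.append(line[i])
--             i += 1
--     return ''.join(result)
-- ===== SOURCE B (Python) =====
-- def convert_line_to_tsv(line: str) -> str:
--     """Single pass: track in-quotes state; replace unquoted commas with tabs."""
--     if line.count('"') % 2 != 0:
--         raise ValueError("Несбалансированные кавычки в строке")
--     out = []
--     in_quotes = False
--     for ch in line:
--         if ch == '"':
--             in_quotes = not in_quotes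
--             out.append(ch)
--         elif ch == ',' and not in_quotes:
--             out.append('\t')
--         else:
--             out.append(ch)
--     return ''.join(out)
-- ===== Notes on version B (the rewrite author's own statement) =====
-- stated objective: faster
-- what changed: B makes a single pass carrying an in_quotes flag instead of rescanning the whole prefix for quote parity at every comma.
import Mathlib
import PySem

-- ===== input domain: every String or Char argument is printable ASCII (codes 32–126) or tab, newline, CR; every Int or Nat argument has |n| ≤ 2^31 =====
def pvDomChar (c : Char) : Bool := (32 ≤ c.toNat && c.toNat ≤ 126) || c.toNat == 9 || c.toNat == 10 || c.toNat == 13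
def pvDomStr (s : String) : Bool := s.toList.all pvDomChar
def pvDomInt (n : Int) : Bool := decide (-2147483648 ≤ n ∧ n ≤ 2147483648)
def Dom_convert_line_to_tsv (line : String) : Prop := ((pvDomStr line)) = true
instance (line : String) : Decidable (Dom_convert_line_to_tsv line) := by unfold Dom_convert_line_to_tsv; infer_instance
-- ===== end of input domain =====

-- B replaces A's per-comma rescan of the whole prefix by one pass with an in_quotes flag (objective: faster).
-- A raises ValueError on lines with an odd number of quote characters; Pre_ excludes exactly those lines.

-- ===== PORT A =====
-- is_delimiter_comma: rescans line[:pos] toggling in_quotes, returns not in_quotes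
def pvIsDelimiterComma (line : List Char) (pos : Nat) : Bool :=
  !((line.take pos).foldl (fun q c => if c = '"' then !q else q) false)

-- A's while-loop: per character i, if it is ',' and is_delimiter_comma(line, i) append '\t' else the char
def pvAGo (line : List Char) : List Char → Nat → List Char
  | [], _ => []
  | c :: rest, i =>
      (if c = ',' ∧ pvIsDelimiterComma line i then ['\t'] else [c]) ++ pvAGo line rest (i + 1)

def convert_line_to_tsv (line : String) : String :=
  if line.toList.count '"' % 2 ≠ 0 then ""   -- Python: raise ValueError (excluded by Pre_)
  else String.mk (pvAGo line.toList line.toList 0)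

-- ===== PORT B =====
-- B's single pass carrying in_quotes
def pvBGo : List Char → Bool → List Char
  | [], _ => []
  | c :: rest, inq =>
      if c = '"' then c :: pvBGo rest (!inq)
      else if c = ',' ∧ !inq then '\t' :: pvBGo rest inq
      else c :: pvBGo rest inq

def convert_line_to_tsv_alt (line : String) : String :=
  if line.toList.count '"' % 2 ≠ 0 then ""   -- Python: raise ValueError (excluded by Pre_)
  else String.mk (pvBGo line.toList false)

-- ===== PRECONDITION & SPEC =====
-- Pre_ excludes exactly the lines with an odd number of quote characters, on which A raises ValueError.
def Pre_convert_line_to_tsv (line : String) : Prop := line.toList.count '"' % 2 = 0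
instance (line : String) : Decidable (Pre_convert_line_to_tsv line) := by unfold Pre_convert_line_to_tsv; infer_instance
def pvWitness_convert_line_to_tsv : String := "\"a, b\",1,2"

def Spec_convert_line_to_tsv (line : String) (out : String) : Prop := out = convert_line_to_tsv_alt line
instance (line : String) (out : String) : Decidable (Spec_convert_line_to_tsv line out) := by unfold Spec_convert_line_to_tsv; infer_instance

-- ===== CLAIM (what is proved, stated in full; the proofs are below) =====
def Claim_equal_convert_line_to_tsv : Prop := ∀ (line : String), Dom_convert_line_to_tsv line → Pre_convert_line_to_tsv line → Spec_convert_line_to_tsv line (convert_line_to_tsv line)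

-- ===== LEMMAS AND PROOFS =====

-- A's rescanned prefix parity coincides with B's carried flag, so the two loops emit the same characters.
theorem pvAGo_eq_pvBGo (cs : List Char) :
    ∀ (rest : List Char) (i : Nat),
      cs.drop i = rest →
      pvAGo cs rest i = pvBGo rest ((cs.take i).foldl (fun q c => if c = '"' then !q else q) false) := by
  intro rest
  induction rest with
  | nil => intro i _; rfl
  | cons c rest' ih =>
    intro i hdrop
    have hdrop' : cs.drop (i + 1) = rest' := by
      have := congrArg (List.drop 1) hdrop
      simpa [List.drop_drop, Nat.add_comm] using this
    have hget : cs[i]? = some c := by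
      have h0 : (cs.drop i)[0]? = some c := by rw [hdrop]; rfl
      simpa [List.getElem?_drop] using h0
    have htake : cs.take (i + 1) = cs.take i ++ [c] := by
      rw [List.take_add_one, hget]; rfl
    have hrec := ih (i + 1) hdrop'
    rw [htake] at hrec
    simp only [List.foldl_append, List.foldl_cons, List.foldl_nil] at hrec
    by_cases hq : c = '"'
    · subst hq
      simp [pvAGo, pvBGo, pvIsDelimiterComma, hrec]
    · by_cases hc : c = ','
      · subst hc
        simp only [pvAGo, pvBGo, pvIsDelimiterComma, hrec]
        by_cases hp : (cs.take i).foldl (fun q c => if c = '"' then !q else q) false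
        · simp [hp]
        · simp at hp; simp [hp]
      · simp [pvAGo, pvBGo, pvIsDelimiterComma, hq, hc, hrec]

-- ===== VERDICT (by name: the statement is the Claim_ definition above) =====
theorem convert_line_to_tsv_spec : Claim_equal_convert_line_to_tsv := by
  intro line _ _
  unfold Spec_convert_line_to_tsv convert_line_to_tsv convert_line_to_tsv_alt
  split
  · rfl
  · have := pvAGo_eq_pvBGo line.toList line.toList 0 (by simp)
    simp at this
    rw [this]
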